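-- pv_equiv track=rewrite | github.com/ssg-is-coding/My_personal_projects | One_Player_RPC_game/One_Player_RPC_game.py | init_choice_list
-- ===== SOURCE A (Python) =====
-- def init_choice_list(handshapes):
--     k = 0;
--     while k < 100:
--         if k <= 33:
--             handshapes.append(0)
--             k += 1
--         elif k >= 33 and k <= 66:
--             handshapes.append(1)
--             k += 1
--         else:
--             handshapes.append(2)
--             k += 1
--     return handshapes
-- ===== SOURCE B (Python) =====
-- def init_choice_list(handshapes):
--     handshapes.extend([0] * 34 + [1] * 33 + [2] * 33)
--     return handshapes
-- ===== Notes on version B (the rewrite author's own statement) =====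
-- stated objective: simpler
-- what changed: Replaces the 100-iteration while loop with threshold branches by a single closed-form extend of three constant runs ([0]*34 + [1]*33 + [2]*33).
import Mathlib
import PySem

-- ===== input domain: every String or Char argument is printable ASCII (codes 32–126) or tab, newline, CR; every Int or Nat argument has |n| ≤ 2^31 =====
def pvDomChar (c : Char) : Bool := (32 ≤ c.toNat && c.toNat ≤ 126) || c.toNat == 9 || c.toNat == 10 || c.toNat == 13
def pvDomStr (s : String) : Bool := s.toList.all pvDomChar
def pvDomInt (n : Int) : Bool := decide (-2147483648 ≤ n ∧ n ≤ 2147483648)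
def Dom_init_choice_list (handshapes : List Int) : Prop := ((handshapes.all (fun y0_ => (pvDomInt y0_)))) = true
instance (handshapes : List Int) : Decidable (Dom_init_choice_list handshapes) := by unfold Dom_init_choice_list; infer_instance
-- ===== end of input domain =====

-- B replaces A's 100-step while loop with one closed-form append of three constant runs (simpler);
-- A mutates its argument in place, this file proves equality of the RETURN value only (B's Python mutates identically via extend).

-- ===== PORT A =====
-- A's 'while k < 100' loop: fuel = remaining iterations (100 - k), k carried as Int as in Python
def pvLoopA (fuel : Nat) (k : Int) (handshapes : List Int) : List Int :=
  match fuel with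
  | 0 => handshapes
  | n + 1 =>
    if k ≤ 33 then pvLoopA n (k + 1) (handshapes ++ [0])
    else if k ≥ 33 ∧ k ≤ 66 then pvLoopA n (k + 1) (handshapes ++ [1])
    else pvLoopA n (k + 1) (handshapes ++ [2])

def init_choice_list (handshapes : List Int) : List Int :=
  pvLoopA 100 0 handshapes

-- ===== PORT B =====
def init_choice_list_alt (handshapes : List Int) : List Int :=
  handshapes ++ (List.replicate 34 (0 : Int) ++ List.replicate 33 1 ++ List.replicate 33 2)

-- ===== PRECONDITION & SPEC =====
def Spec_init_choice_list (handshapes : List Int) (out : List Int) : Prop := out = init_choice_list_alt handshapes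
instance (handshapes : List Int) (out : List Int) : Decidable (Spec_init_choice_list handshapes out) := by unfold Spec_init_choice_list; infer_instance

-- ===== CLAIM (what is proved, stated in full; the proofs are below) =====
def Claim_equal_init_choice_list : Prop := ∀ (handshapes : List Int), Dom_init_choice_list handshapes → Spec_init_choice_list handshapes (init_choice_list handshapes)

-- ===== LEMMAS AND PROOFS =====
theorem pvLoopA_acc (n : Nat) : ∀ (k : Int) (hs : List Int),
    pvLoopA n k hs = hs ++ pvLoopA n k [] := by
  induction n with
  | zero => intro k hs; simp [pvLoopA]
  | succ m ih =>
    intro k hs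
    simp only [pvLoopA]
    split_ifs with h1 h2
    · rw [ih (k+1) (hs ++ [0]), ih (k+1) ([] ++ [0])]; simp
    · rw [ih (k+1) (hs ++ [1]), ih (k+1) ([] ++ [1])]; simp
    · rw [ih (k+1) (hs ++ [2]), ih (k+1) ([] ++ [2])]; simp

set_option maxRecDepth 4000 in
theorem pvLoopA_closed : pvLoopA 100 0 [] =
    List.replicate 34 (0 : Int) ++ List.replicate 33 1 ++ List.replicate 33 2 := by
  decide

-- ===== VERDICT (by name: the statement is the Claim_ definition above) =====
theorem init_choice_list_spec : Claim_equal_init_choice_list := by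
  intro hs _
  show init_choice_list hs = init_choice_list_alt hs
  rw [init_choice_list, pvLoopA_acc, pvLoopA_closed, init_choice_list_alt]
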